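-- pv_equiv track=rewrite | github.com/parttimenerd/jhserr | hserr-grammar/gen_icon.py | in_rounded_rect
-- ===== SOURCE A (Python) =====
-- def in_rounded_rect(x, y, x1, y1, x2, y2, r):
--     if x1 + r <= x <= x2 - r or y1 + r <= y <= y2 - r:
--         return True
--     corners = ((x1 + r, y1 + r), (x2 - r, y1 + r), (x1 + r, y2 - r), (x2 - r, y2 - r))
--     for cx, cy in corners:
--         if (x - cx) ** 2 + (y - cy) ** 2 <= r * r:
--             return True
--     return False
-- ===== SOURCE B (Python) =====
-- def in_rounded_rect(x, y, x1, y1, x2, y2, r):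
--     if x1 + r <= x <= x2 - r or y1 + r <= y <= y2 - r:
--         return True
--     dx = min(abs(x - (x1 + r)), abs(x - (x2 - r)))
--     dy = min(abs(y - (y1 + r)), abs(y - (y2 - r)))
--     return dx * dx + dy * dy <= r * r
-- ===== Notes on version B (the rewrite author's own statement) =====
-- stated objective: simpler
-- what changed: Replaces the 4-corner loop by a single closed-form test: per-axis minimal distance to the two corner centre coordinates, then one squared-distance comparison (the minimum corner distance factors into min x-offset and min y-offset).
import Mathlib
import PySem

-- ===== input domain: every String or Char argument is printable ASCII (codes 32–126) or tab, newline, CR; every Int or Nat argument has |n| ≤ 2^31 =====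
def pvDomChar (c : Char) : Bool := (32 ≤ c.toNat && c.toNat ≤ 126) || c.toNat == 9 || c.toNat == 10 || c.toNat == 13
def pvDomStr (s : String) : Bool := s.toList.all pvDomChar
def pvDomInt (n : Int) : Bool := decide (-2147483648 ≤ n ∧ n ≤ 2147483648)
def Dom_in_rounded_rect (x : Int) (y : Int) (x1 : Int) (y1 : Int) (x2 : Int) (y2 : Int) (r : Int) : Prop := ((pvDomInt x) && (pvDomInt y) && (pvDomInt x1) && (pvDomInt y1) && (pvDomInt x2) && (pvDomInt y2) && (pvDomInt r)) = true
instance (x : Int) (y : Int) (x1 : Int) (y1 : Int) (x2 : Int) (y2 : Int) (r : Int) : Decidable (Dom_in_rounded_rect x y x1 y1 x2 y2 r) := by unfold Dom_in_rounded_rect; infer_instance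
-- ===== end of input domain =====

-- B replaces the four-corner loop by one closed-form min-offset distance test (same guard kept); simpler decomposition, same O(1) cost.
-- ===== PORT A =====
-- literal port of A: early cross guard, then the four corner tests in loop order
def in_rounded_rect (x : Int) (y : Int) (x1 : Int) (y1 : Int) (x2 : Int) (y2 : Int) (r : Int) : Bool :=
  if (x1 + r ≤ x ∧ x ≤ x2 - r) ∨ (y1 + r ≤ y ∧ y ≤ y2 - r) then true
  else if (x - (x1 + r)) ^ 2 + (y - (y1 + r)) ^ 2 ≤ r * r then true
  else if (x - (x2 - r)) ^ 2 + (y - (y1 + r)) ^ 2 ≤ r * r then true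
  else if (x - (x1 + r)) ^ 2 + (y - (y2 - r)) ^ 2 ≤ r * r then true
  else if (x - (x2 - r)) ^ 2 + (y - (y2 - r)) ^ 2 ≤ r * r then true
  else false

-- ===== PORT B =====
-- port of B: same guard, then one closed-form test via per-axis minimal offsets
def in_rounded_rect_alt (x : Int) (y : Int) (x1 : Int) (y1 : Int) (x2 : Int) (y2 : Int) (r : Int) : Bool :=
  if (x1 + r ≤ x ∧ x ≤ x2 - r) ∨ (y1 + r ≤ y ∧ y ≤ y2 - r) then true
  else
    let dx := min |x - (x1 + r)| |x - (x2 - r)|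
    let dy := min |y - (y1 + r)| |y - (y2 - r)|
    decide (dx * dx + dy * dy ≤ r * r)

-- ===== PRECONDITION & SPEC =====
def Spec_in_rounded_rect (x : Int) (y : Int) (x1 : Int) (y1 : Int) (x2 : Int) (y2 : Int) (r : Int) (out : Bool) : Prop := out = in_rounded_rect_alt x y x1 y1 x2 y2 r
instance (x : Int) (y : Int) (x1 : Int) (y1 : Int) (x2 : Int) (y2 : Int) (r : Int) (out : Bool) : Decidable (Spec_in_rounded_rect x y x1 y1 x2 y2 r out) := by unfold Spec_in_rounded_rect; infer_instance

-- ===== CLAIM (what is proved, stated in full; the proofs are below) =====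
def Claim_equal_in_rounded_rect : Prop := ∀ (x : Int) (y : Int) (x1 : Int) (y1 : Int) (x2 : Int) (y2 : Int) (r : Int), Dom_in_rounded_rect x y x1 y1 x2 y2 r → Spec_in_rounded_rect x y x1 y1 x2 y2 r (in_rounded_rect x y x1 y1 x2 y2 r)

-- ===== LEMMAS AND PROOFS =====

-- ===== VERDICT (by name: the statement is the Claim_ definition above) =====
-- the 4-corner disjunction is exactly the min-offset test
lemma four_corner_min (a b c d r : Int) :
    (a ^ 2 + c ^ 2 ≤ r * r ∨ b ^ 2 + c ^ 2 ≤ r * r ∨ a ^ 2 + d ^ 2 ≤ r * r ∨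
      b ^ 2 + d ^ 2 ≤ r * r) ↔
    min |a| |b| * min |a| |b| + min |c| |d| * min |c| |d| ≤ r * r := by
  constructor
  · rintro (h | h | h | h) <;>
      nlinarith [min_le_left |a| |b|, min_le_right |a| |b|, min_le_left |c| |d|,
        min_le_right |c| |d|, le_min (abs_nonneg a) (abs_nonneg b),
        le_min (abs_nonneg c) (abs_nonneg d), abs_mul_abs_self a, abs_mul_abs_self b,
        abs_mul_abs_self c, abs_mul_abs_self d, sq_abs a, sq_abs b, sq_abs c, sq_abs d]
  · intro h
    rcases min_cases |a| |b| with ⟨hx, _⟩ | ⟨hx, _⟩ <;>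
      rcases min_cases |c| |d| with ⟨hy, _⟩ | ⟨hy, _⟩ <;> rw [hx, hy] at h
    · exact Or.inl (by nlinarith [abs_mul_abs_self a, abs_mul_abs_self c, sq_abs a, sq_abs c])
    · exact Or.inr (Or.inr (Or.inl (by
        nlinarith [abs_mul_abs_self a, abs_mul_abs_self d, sq_abs a, sq_abs d])))
    · exact Or.inr (Or.inl (by
        nlinarith [abs_mul_abs_self b, abs_mul_abs_self c, sq_abs b, sq_abs c]))
    · exact Or.inr (Or.inr (Or.inr (by
        nlinarith [abs_mul_abs_self b, abs_mul_abs_self d, sq_abs b, sq_abs d])))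

theorem in_rounded_rect_spec : Claim_equal_in_rounded_rect := by
  intro x y x1 y1 x2 y2 r _
  unfold Spec_in_rounded_rect in_rounded_rect in_rounded_rect_alt
  by_cases hg : (x1 + r ≤ x ∧ x ≤ x2 - r) ∨ (y1 + r ≤ y ∧ y ≤ y2 - r)
  · simp [hg]
  · simp only [if_neg hg]
    have h4 := four_corner_min (x - (x1 + r)) (x - (x2 - r)) (y - (y1 + r)) (y - (y2 - r)) r
    split_ifs with c1 c2 c3 c4
    · exact (decide_eq_true (h4.mp (Or.inl c1))).symm
    · exact (decide_eq_true (h4.mp (Or.inr (Or.inl c2)))).symm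
    · exact (decide_eq_true (h4.mp (Or.inr (Or.inr (Or.inl c3))))).symm
    · exact (decide_eq_true (h4.mp (Or.inr (Or.inr (Or.inr c4))))).symm
    · refine (decide_eq_false ?_).symm
      intro hm
      rcases h4.mpr hm with h | h | h | h
      exacts [c1 h, c2 h, c3 h, c4 h]
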